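-- pv_equiv track=rewrite | github.com/Sectum2010/Elvern | backend/app/services/assistant_service.py | _normalized_duplicate_ids
-- ===== SOURCE A (Python) =====
-- def _normalized_duplicate_ids(values: list[int]) -> list[int]:
--     normalized: list[int] = []
--     seen: set[int] = set()
--     for value in values:
--         try:
--             candidate = int(value)
--         except (TypeError, ValueError):
--             continue
--         if candidate <= 0 or candidate in seen:
--             continue
--         normalized.append(candidate)
--         seen.add(candidate)
--     return normalized[:20]
-- ===== SOURCE B (Python) =====
-- def _normalized_duplicate_ids(values):
--     rest = [v for v in values if int(v) > 0]
--     out = []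
--     while rest and len(out) < 20:
--         head = rest[0]
--         out.append(head)
--         rest = [v for v in rest[1:] if v != head]
--     return out
-- ===== Notes on version B (the rewrite author's own statement) =====
-- stated objective: alternative
-- what changed: Replaces A's seen-set membership test by selection-by-erasure: after one positive filter, a loop repeatedly emits the first remaining element and erases all its duplicates from the rest, capping inside the loop instead of slicing at the end.
import Mathlib
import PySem

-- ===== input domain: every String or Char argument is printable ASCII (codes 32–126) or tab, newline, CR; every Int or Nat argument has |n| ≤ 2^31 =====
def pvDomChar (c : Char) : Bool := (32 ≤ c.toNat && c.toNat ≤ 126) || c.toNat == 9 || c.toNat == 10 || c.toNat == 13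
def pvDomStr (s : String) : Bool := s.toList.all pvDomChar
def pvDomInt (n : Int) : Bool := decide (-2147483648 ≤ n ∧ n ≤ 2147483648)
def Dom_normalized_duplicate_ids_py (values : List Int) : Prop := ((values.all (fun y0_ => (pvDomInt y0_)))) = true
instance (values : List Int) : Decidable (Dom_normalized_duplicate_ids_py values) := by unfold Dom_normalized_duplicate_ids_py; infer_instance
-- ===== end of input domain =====

-- B replaces A's seen-set loop by selection-by-erasure: filter positives, then repeatedly
-- emit the first remaining element and erase its duplicates from the rest, capping in-loop (alternative, same cost).

-- ===== PORT A =====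
-- A: loop appending to `normalized` and `seen`; int(value) is the identity on an int, so the try/except never fires.
def normalized_duplicate_ids_py (values : List Int) : List Int :=
  let st := values.foldl
    (fun (st : List Int × PySem.Set Int) value =>
      let candidate := value
      if candidate ≤ 0 ∨ PySem.Set.contains st.2 candidate then st
      else (st.1 ++ [candidate], PySem.Set.add st.2 candidate))
    ([], PySem.Set.empty)
  PySem.List.slice st.1 none (some 20)

-- ===== PORT B =====
-- B's while loop: `while rest and len(out) < 20`: emit rest[0], erase its duplicates from the rest.
def pvEraseLoop (rest out : List Int) : List Int :=
  match rest with
  | [] => out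
  | head :: t =>
    if out.length < 20 then
      pvEraseLoop (t.filter (fun v => decide (v ≠ head))) (out ++ [head])
    else out
termination_by rest.length
decreasing_by
  simp
  exact le_trans (List.length_filter_le _ _) (le_of_eq List.length_attach)

def normalized_duplicate_ids_py_alt (values : List Int) : List Int :=
  let rest := values.filter (fun v => decide (0 < v))
  pvEraseLoop rest []

-- ===== PRECONDITION & SPEC =====
def Spec_normalized_duplicate_ids_py (values : List Int) (out : List Int) : Prop := out = normalized_duplicate_ids_py_alt values
instance (values : List Int) (out : List Int) : Decidable (Spec_normalized_duplicate_ids_py values out) := by unfold Spec_normalized_duplicate_ids_py; infer_instance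

-- ===== CLAIM (what is proved, stated in full; the proofs are below) =====
def Claim_equal_normalized_duplicate_ids_py : Prop := ∀ (values : List Int), Dom_normalized_duplicate_ids_py values → Spec_normalized_duplicate_ids_py values (normalized_duplicate_ids_py values)

-- ===== LEMMAS AND PROOFS =====

-- A's `seen` set equals its `normalized` list throughout the loop, and the loop is
-- exactly Set.update over the positive elements.
theorem pv_loop_eq (values : List Int) (s : PySem.Set Int) :
    values.foldl
      (fun (st : List Int × PySem.Set Int) value =>
        if value ≤ 0 ∨ PySem.Set.contains st.2 value then st
        else (st.1 ++ [value], PySem.Set.add st.2 value))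
      (s, s)
    = (PySem.Set.update s (values.filter (fun v => 0 < v)),
       PySem.Set.update s (values.filter (fun v => 0 < v))) := by
  induction values generalizing s with
  | nil => simp [PySem.Set.update]
  | cons v vs ih =>
    by_cases hv : v ≤ 0
    · have hf : ¬ (0 < v) := by omega
      simp only [List.foldl_cons, if_pos (Or.inl hv), List.filter_cons, hf]
      simpa using ih s
    · have hf : (0 < v) := by omega
      by_cases hm : v ∈ s
      · simp only [List.foldl_cons, List.filter_cons, hf, decide_true, if_true,
          PySem.Set.update, List.foldl_cons]
        rw [if_pos (by simp [hm]), PySem.Set.add_of_mem hm]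
        simpa [PySem.Set.update] using ih s
      · simp only [List.foldl_cons, List.filter_cons, hf, decide_true, if_true,
          PySem.Set.update, List.foldl_cons]
        rw [if_neg (by simp [hm]; omega)]
        rw [PySem.Set.add_of_not_mem hm]
        have := ih (PySem.Set.add s v)
        rw [PySem.Set.add_of_not_mem hm] at this
        simpa [PySem.Set.update] using this

theorem pv_mem_add (s : PySem.Set Int) (v h : Int) (hm : h ∈ s) : h ∈ PySem.Set.add s v := by
  simp [PySem.Set.add]
  split <;> simp [hm]

-- elements already in the set are skipped identically after filtering them out
theorem pv_update_filter (l : List Int) (s : PySem.Set Int) (h : Int) (hm : h ∈ s) :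
    PySem.Set.update s l = PySem.Set.update s (l.filter (fun v => decide (v ≠ h))) := by
  induction l generalizing s with
  | nil => rfl
  | cons v t ih =>
    by_cases hv : v = h
    · subst hv
      have hf : List.filter (fun x => decide (x ≠ v)) (v :: t)
          = List.filter (fun x => decide (x ≠ v)) t := by simp
      rw [hf,
        show PySem.Set.update s (v :: t) = PySem.Set.update (PySem.Set.add s v) t from rfl,
        PySem.Set.add_of_mem hm]
      exact ih s hm
    · have hf : List.filter (fun x => decide (x ≠ h)) (v :: t)
          = v :: List.filter (fun x => decide (x ≠ h)) t := by simp [hv]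
      rw [hf,
        show PySem.Set.update s (v :: t) = PySem.Set.update (PySem.Set.add s v) t from rfl,
        show PySem.Set.update s (v :: List.filter (fun x => decide (x ≠ h)) t)
          = PySem.Set.update (PySem.Set.add s v) (List.filter (fun x => decide (x ≠ h)) t) from rfl]
      exact ih (PySem.Set.add s v) (pv_mem_add s v h hm)

-- pushing a fresh head through Set.update
theorem pv_update_cons (l : List Int) (s : List Int) (h : Int) (hnl : h ∉ l) :
    PySem.Set.update (h :: s) l = h :: PySem.Set.update s l := by
  induction l generalizing s with
  | nil => rfl
  | cons v t ih =>
    have hvh : v ≠ h := fun e => hnl (by simp [e])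
    have hnl' : h ∉ t := fun e => hnl (by simp [e])
    have hadd : PySem.Set.add (h :: s) v = h :: PySem.Set.add s v := by
      simp [PySem.Set.add, PySem.Set.contains, hvh]
      split <;> simp
    rw [show PySem.Set.update (h :: s) (v :: t) = PySem.Set.update (PySem.Set.add (h :: s) v) t from rfl,
      show PySem.Set.update s (v :: t) = PySem.Set.update (PySem.Set.add s v) t from rfl,
      hadd]
    exact ih (PySem.Set.add s v) hnl'

-- set(h :: t) = h :: set(t with h erased)
theorem pv_ofList_cons (h : Int) (t : List Int) :
    PySem.Set.ofList (h :: t) = h :: PySem.Set.ofList (t.filter (fun v => decide (v ≠ h))) := by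
  have h1 : PySem.Set.ofList (h :: t) = PySem.Set.update [h] t := by
    simp [PySem.Set.ofList_eq_foldl, PySem.Set.update, PySem.Set.add, PySem.Set.contains]
  rw [h1, pv_update_filter t [h] h (by simp)]
  exact pv_update_cons _ [] h (by simp)

-- the erasure loop without its accumulator: take n of the erasure dedup
def pvT : List Int → Nat → List Int
  | _, 0 => []
  | [], _ => []
  | h :: t, Nat.succ n => h :: pvT (t.filter (fun v => decide (v ≠ h))) n
termination_by l _ => l.length
decreasing_by
  simp
  exact le_trans (List.length_filter_le _ _) (le_of_eq List.length_attach)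

-- strips `(filter p l.attach).unattach` artifacts from functional-induction hypotheses
theorem pv_ua {α : Type} {P : α → Prop} (p : α → Bool) (l : List (Subtype P)) :
    (List.filter (fun x => p x.val) l).unattach = List.filter p l.unattach := by
  induction l with
  | nil => rfl
  | cons a l ih =>
      simp only [List.filter_cons, List.unattach_cons]
      split <;> simp_all [List.unattach_cons]

theorem pv_loop_to_T : ∀ (rest out : List Int),
    pvEraseLoop rest out = out ++ pvT rest (20 - out.length) := by
  intro rest out
  fun_induction pvEraseLoop rest out with
  | case1 out => cases h : 20 - out.length <;> simp [pvT]
  | case2 out head t hlt ih =>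
      have h20 : 20 - out.length = (20 - (out.length + 1)) + 1 := by omega
      rw [pv_ua (fun v => decide (v ≠ head)) t.attach, List.unattach_attach] at ih
      rw [ih, h20]
      simp [pvT]
  | case3 out head t hge =>
      have h0 : 20 - out.length = 0 := by omega
      rw [h0]
      simp [pvT]

theorem pv_T_eq_take : ∀ (l : List Int) (n : Nat),
    pvT l n = (PySem.Set.ofList l).take n := by
  intro l n
  fun_induction pvT l n with
  | case1 l => simp
  | case2 n => simp [PySem.Set.ofList]
  | case3 h t n ih =>
      rw [pv_ua (fun v => decide (v ≠ h)) t.attach, List.unattach_attach] at ih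
      rw [pv_ofList_cons, List.take_succ_cons, ih]

-- ===== VERDICT (by name: the statement is the Claim_ definition above) =====
theorem normalized_duplicate_ids_py_spec : Claim_equal_normalized_duplicate_ids_py := by
  intro values _
  show normalized_duplicate_ids_py values = normalized_duplicate_ids_py_alt values
  have h := pv_loop_eq values PySem.Set.empty
  simp only [normalized_duplicate_ids_py, normalized_duplicate_ids_py_alt]
  simp only [PySem.Set.empty] at h ⊢
  rw [h]
  rw [PySem.List.slice_to _ (by norm_num)]
  rw [pv_loop_to_T]
  simp only [List.nil_append, List.length_nil, Nat.sub_zero]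
  rw [pv_T_eq_take]
  simp [PySem.Set.ofList_eq_foldl, PySem.Set.update]
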